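-- pv_equiv track=rewrite | github.com/nicol337/python-exercises | CodeEval/columnnames.py | decTo26base
-- ===== SOURCE A (Python) =====
-- def decTo26base(num):
-- 	stack = []
-- 	val_str = ''
-- 	letters = ' '+''.join([chr(i) for i in range(65,91)])
-- 	while num > 0:
-- 		remainder = num % 26
-- 		stack.append(remainder)
-- 		num = (num-1)// 26
-- 	while stack:
-- 		num = stack.pop()
-- 		if num == 0:
-- 			num = 26
-- 		val_str = val_str + letters[num]
-- 	return val_str
-- ===== SOURCE B (Python) =====
-- def decTo26base(num):
--     if num <= 0:
--         return ''
--     q, r = divmod(num - 1, 26)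
--     return decTo26base(q) + chr(65 + r)
-- ===== Notes on version B (the rewrite author's own statement) =====
-- stated objective: simpler
-- what changed: Replaced A's two-phase loop (build a remainder stack, then pop it against a ' '+A..Z lookup table) by a single divide-and-recurse on divmod(num-1,26) with chr(65+r), no stack and no table.
import Mathlib
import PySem

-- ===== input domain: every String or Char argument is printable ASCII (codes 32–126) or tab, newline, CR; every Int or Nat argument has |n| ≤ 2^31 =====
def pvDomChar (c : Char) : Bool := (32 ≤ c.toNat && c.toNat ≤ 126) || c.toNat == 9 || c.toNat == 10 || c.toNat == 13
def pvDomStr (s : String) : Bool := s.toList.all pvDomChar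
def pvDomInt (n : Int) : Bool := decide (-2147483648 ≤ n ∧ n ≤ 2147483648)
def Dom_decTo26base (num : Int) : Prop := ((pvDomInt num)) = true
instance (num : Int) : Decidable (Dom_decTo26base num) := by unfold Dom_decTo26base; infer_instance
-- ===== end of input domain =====

-- B replaces A's stack-then-string two-phase loop by a single recursion on divmod(num-1,26): simpler.

-- ===== PORT A =====
-- letters = ' ' + ''.join([chr(i) for i in range(65,91)])
def pvLetters : String :=
  String.mk (' ' :: (PySem.List.pyRange 65 91 1).map (fun i => Char.ofNat i.toNat))

-- "if num == 0: num = 26; val_str = val_str + letters[num]" — the one-character string appended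
def pvLetterAt (num : Int) : String :=
  (PySem.Str.pyGet? pvLetters (if num = 0 then 26 else num)).elim "" (fun c => String.mk [c])

-- first while loop: build the stack of remainders
def pvALoop1 (num : Int) (stack : List Int) : List Int :=
  if num > 0 then
    pvALoop1 (PySem.Int.floordiv (num - 1) 26) (stack ++ [PySem.Int.mod num 26])
  else stack
termination_by num.toNat
decreasing_by
  rw [PySem.Int.floordiv_eq_ediv_of_pos (by omega : (0:Int) < 26)]
  omega

-- second while loop: pop the stack, appending letters[num]
def pvALoop2 (stack : List Int) (val : String) : String :=
  match stack with
  | [] => val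
  | s :: ss =>
    pvALoop2 (s :: ss).dropLast (val ++ pvLetterAt ((s :: ss).getLast?.getD 0))
termination_by stack.length
decreasing_by simp

def decTo26base (num : Int) : String := pvALoop2 (pvALoop1 num []) ""

-- ===== PORT B =====
def decTo26base_alt (num : Int) : String :=
  if num ≤ 0 then ""
  else
    decTo26base_alt (PySem.Int.floordiv (num - 1) 26)
      ++ String.mk [Char.ofNat (65 + PySem.Int.mod (num - 1) 26).toNat]
termination_by num.toNat
decreasing_by
  rw [PySem.Int.floordiv_eq_ediv_of_pos (by omega : (0:Int) < 26)]
  omega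

-- ===== PRECONDITION & SPEC =====
def Spec_decTo26base (num : Int) (out : String) : Prop := out = decTo26base_alt num
instance (num : Int) (out : String) : Decidable (Spec_decTo26base num out) := by unfold Spec_decTo26base; infer_instance

-- ===== CLAIM (what is proved, stated in full; the proofs are below) =====
def Claim_equal_decTo26base : Prop := ∀ (num : Int), Dom_decTo26base num → Spec_decTo26base num (decTo26base num)

-- ===== LEMMAS AND PROOFS =====

theorem pvALoop1_pos {n : Int} (h : n > 0) (s : List Int) :
    pvALoop1 n s = pvALoop1 (PySem.Int.floordiv (n - 1) 26) (s ++ [PySem.Int.mod n 26]) := by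
  rw [pvALoop1]; simp [h]

theorem pvALoop1_nonpos {n : Int} (h : ¬ n > 0) (s : List Int) :
    pvALoop1 n s = s := by
  rw [pvALoop1]; simp [h]

theorem pvALoop1_acc (k : Nat) : ∀ (n : Int), n.toNat ≤ k → ∀ (s : List Int),
    pvALoop1 n s = s ++ pvALoop1 n [] := by
  induction k with
  | zero =>
    intro n hn s
    have h : ¬ n > 0 := by omega
    rw [pvALoop1_nonpos h, pvALoop1_nonpos h]
    simp
  | succ k ih =>
    intro n hn s
    by_cases h : n > 0
    · have hq : (PySem.Int.floordiv (n - 1) 26).toNat ≤ k := by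
        rw [PySem.Int.floordiv_eq_ediv_of_pos (by omega : (0:Int) < 26)]
        omega
      rw [pvALoop1_pos h, pvALoop1_pos h,
          ih _ hq (s ++ [PySem.Int.mod n 26]), ih _ hq ([] ++ [PySem.Int.mod n 26])]
      simp
    · rw [pvALoop1_nonpos h, pvALoop1_nonpos h]
      simp

theorem pvALoop2_concat (l : List Int) (x : Int) (v : String) :
    pvALoop2 (l ++ [x]) v = pvALoop2 l (v ++ pvLetterAt x) := by
  obtain ⟨a, as, h⟩ : ∃ a as, l ++ [x] = a :: as := by
    cases l <;> exact ⟨_, _, rfl⟩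
  rw [h, pvALoop2, ← h]
  simp

theorem pvALoop2_single (x : Int) (v : String) :
    pvALoop2 [x] v = v ++ pvLetterAt x := by
  simpa [pvALoop2] using pvALoop2_concat [] x v

theorem pvALoop2_append (t s : List Int) : ∀ (v : String),
    pvALoop2 (s ++ t) v = pvALoop2 s (pvALoop2 t v) := by
  induction t using List.reverseRecOn with
  | nil => intro v; simp [pvALoop2]
  | append_singleton t' x ih =>
    intro v
    rw [← List.append_assoc, pvALoop2_concat, pvALoop2_concat, ih]

theorem pvLetter_eq (n : Int) (hn : 0 < n) :
    pvLetterAt (PySem.Int.mod n 26) = String.mk [Char.ofNat (65 + PySem.Int.mod (n - 1) 26).toNat] := by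
  rw [PySem.Int.mod_eq_emod_of_pos (by omega : (0:Int) < 26),
      PySem.Int.mod_eq_emod_of_pos (by omega : (0:Int) < 26)]
  by_cases hr : n % 26 = 0
  · have h2 : (n - 1) % 26 = 25 := by omega
    rw [hr, h2]; decide
  · have h1 : 1 ≤ n % 26 := by
      have := Int.emod_nonneg n (by omega : (26:Int) ≠ 0); omega
    have h2 : n % 26 ≤ 25 := by
      have := Int.emod_lt_of_pos n (by omega : (0:Int) < 26); omega
    have h3 : (n - 1) % 26 = n % 26 - 1 := by omega
    rw [h3]
    set r := n % 26 with hrdef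
    clear_value r
    interval_cases r <;> decide

theorem pvMain (k : Nat) : ∀ (n : Int), n.toNat ≤ k →
    pvALoop2 (pvALoop1 n []) "" = decTo26base_alt n := by
  induction k with
  | zero =>
    intro n hn
    have h : ¬ n > 0 := by omega
    rw [pvALoop1_nonpos h, decTo26base_alt]
    simp [pvALoop2, show n ≤ 0 by omega]
  | succ k ih =>
    intro n hn
    by_cases h : n > 0
    · have hq : (PySem.Int.floordiv (n - 1) 26).toNat ≤ k := by
        rw [PySem.Int.floordiv_eq_ediv_of_pos (by omega : (0:Int) < 26)]
        omega
      rw [pvALoop1_pos h, List.nil_append,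
          show [PySem.Int.mod n 26] = [] ++ [PySem.Int.mod n 26] from rfl,
          pvALoop1_acc k _ hq, List.nil_append,
          pvALoop2_append, pvALoop2_single, ih _ hq, pvLetter_eq n h]
      conv_rhs => rw [decTo26base_alt]
      simp [show ¬ n ≤ 0 by omega]
    · rw [pvALoop1_nonpos h, decTo26base_alt]
      simp [pvALoop2, show n ≤ 0 by omega]

-- ===== VERDICT (by name: the statement is the Claim_ definition above) =====
theorem decTo26base_spec : Claim_equal_decTo26base := by
  intro num _
  unfold Spec_decTo26base decTo26base
  exact pvMain num.toNat num (le_refl _)
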